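-- pv_equiv track=rewrite | github.com/Kohdz/Algorithms | AmazonOAII/itemsInContainers.py | numberOfItemsII
-- ===== SOURCE A (Python) =====
-- def numberOfItemsII(s, startIndices, endIndices):
--
--     output = [0] * len(startIndices)
--     skip = set()
--     count = 0
--
--     for i in range(len(startIndices)):
--         if '|' not in s[startIndices[i]-1: endIndices[i]]:
--             skip.add(startIndices[i])
--
--     for i in range(len(startIndices)):
--         count = 0
--
--         if startIndices[i] in skip:
--             continue
--         substring = s[startIndices[i] - 1: endIndices[i]]
--
--         initialStartPoint = substring.index('|')
--         endPoint = substring.rindex('|')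
--
--         for j in range(initialStartPoint, endPoint):
--             if substring[j] == '*':
--                 count += 1
--
--         output[i] = count
--
--     # for i in range(len(output)):
--     #     if output[i] == -1:
--     #         output[i] = 0
--     return output
-- ===== SOURCE B (Python) =====
-- def numberOfItemsII(s, startIndices, endIndices):
--     n = len(s)
--     # pref[i] = number of '*' in s[:i]
--     pref = [0] * (n + 1)
--     for i in range(n):
--         pref[i + 1] = pref[i] + (1 if s[i] == '*' else 0)
--     # nxt[i] = smallest bar index >= i (n if none)
--     nxt = [n] * (n + 1)
--     for i in range(n - 1, -1, -1):
--         nxt[i] = i if s[i] == '|' else nxt[i + 1]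
--     # prv[i] = largest bar index < i (-1 if none)
--     prv = [-1] * (n + 1)
--     for i in range(1, n + 1):
--         prv[i] = i - 1 if s[i - 1] == '|' else prv[i - 1]
--
--     def clamp(i):
--         if i < 0:
--             return max(0, n + i)
--         return min(i, n)
--
--     out = []
--     for a, b in zip(startIndices, endIndices):
--         lo = clamp(a - 1)
--         hi = clamp(b)
--         f = nxt[lo]
--         l = prv[hi]
--         out.append(pref[l] - pref[f] if f <= l else 0)
--     return out
-- ===== Notes on version B (the rewrite author's own statement) =====
-- stated objective: alternative
-- what changed: Replaces the per-query slice/scan (and the skip set keyed by start value) with three precomputed arrays - star prefix sums, nearest-bar-to-the-right and nearest-bar-to-the-left - so each query is answered by array lookups instead of rescanning the string; not measurably faster in CPython at the tested sizes.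
-- intended difference: When two queries share the same start value and one of them sees no '|' in its window while the other's window has a '*' strictly between two '|', A's skip set (keyed by start VALUE instead of query index) wrongly zeroes the second query's answer, while B returns its true star count, which is the intended per-query value. — e.g. on numberOfItemsII("|*|", [1, 1], [0, 3]): A returns [0, 0], B returns [0, 1]
import Mathlib
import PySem

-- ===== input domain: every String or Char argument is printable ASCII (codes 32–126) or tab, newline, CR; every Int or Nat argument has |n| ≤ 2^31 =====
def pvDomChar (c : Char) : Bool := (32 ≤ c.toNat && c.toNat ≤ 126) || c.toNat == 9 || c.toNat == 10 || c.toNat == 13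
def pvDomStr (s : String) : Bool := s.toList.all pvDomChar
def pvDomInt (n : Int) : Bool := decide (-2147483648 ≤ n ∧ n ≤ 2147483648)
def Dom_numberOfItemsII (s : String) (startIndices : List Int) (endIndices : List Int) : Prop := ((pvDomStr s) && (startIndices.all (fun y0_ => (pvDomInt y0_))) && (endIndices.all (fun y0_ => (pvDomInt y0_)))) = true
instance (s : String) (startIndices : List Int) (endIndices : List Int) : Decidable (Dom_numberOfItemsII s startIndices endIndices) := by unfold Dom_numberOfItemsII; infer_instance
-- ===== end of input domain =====

-- B answers each query from three precomputed arrays (star prefix sums, nearest bar to the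
-- right / to the left) instead of A's per-query slice scan; B also drops A's skip set, which
-- is keyed by start VALUE instead of query index (see D_ below).

-- ===== PORT A =====
def numberOfItemsII (s : String) (startIndices : List Int) (endIndices : List Int) : List Int :=
  let cs := s.toList
  let n := startIndices.length
  let output : List Int := List.replicate n 0
  let skip : PySem.Set Int :=
    (PySem.List.pyRange 0 (n : Int) 1).foldl (fun sk i =>
      if '|' ∉ PySem.List.slice cs (some (PySem.List.pyGetD startIndices i 0 - 1)) (some (PySem.List.pyGetD endIndices i 0))
      then PySem.Set.add sk (PySem.List.pyGetD startIndices i 0)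
      else sk) PySem.Set.empty
  (PySem.List.pyRange 0 (n : Int) 1).foldl (fun out i =>
    if PySem.Set.contains skip (PySem.List.pyGetD startIndices i 0) then out
    else
      let substring := PySem.List.slice cs (some (PySem.List.pyGetD startIndices i 0 - 1)) (some (PySem.List.pyGetD endIndices i 0))
      let initialStartPoint := substring.idxOf '|'
      -- rindex('|') = len - 1 - reverse.index('|'); exact here since the skip guard ensures '|' ∈ substring
      let endPoint := substring.length - 1 - substring.reverse.idxOf '|'
      let count := (PySem.List.pyRange (initialStartPoint : Int) (endPoint : Int) 1).foldl
        (fun c j => if PySem.List.pyGetD substring j ' ' == '*' then c + 1 else c) 0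
      PySem.List.pySetD out i count) output

-- ===== PORT B =====
-- pref[i] = number of '*' in cs[:i]  (Source B fills the array left to right; same values)
def pvPref (acc : Int) : List Char → List Int
  | [] => [acc]
  | c :: cs => acc :: pvPref (acc + if c = '*' then 1 else 0) cs

-- nxt[i] = smallest bar index ≥ i (n if none); Source B fills right-to-left, producing these values
def pvNxt (off : Nat) : List Char → List Nat
  | [] => [off]
  | c :: cs =>
    let rest := pvNxt (off + 1) cs
    (if c = '|' then off else rest.headD (off + 1)) :: rest

-- prv[i] = largest bar index < i (-1 if none); Source B fills left-to-right
def pvPrv (acc : Int) (off : Nat) : List Char → List Int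
  | [] => [acc]
  | c :: cs => acc :: pvPrv (if c = '|' then (off : Int) else acc) (off + 1) cs

-- Python slice-bound normalisation (Source B's clamp)
def pvClamp (n : Nat) (i : Int) : Nat :=
  if i < 0 then ((n : Int) + i).toNat else min i.toNat n

def numberOfItemsII_alt (s : String) (startIndices : List Int) (endIndices : List Int) : List Int :=
  let cs := s.toList
  let n := cs.length
  let pref := pvPref 0 cs
  let nxt := pvNxt 0 cs
  let prv := pvPrv (-1) 0 cs
  (startIndices.zip endIndices).map (fun q =>
    let lo := pvClamp n (q.1 - 1)
    let hi := pvClamp n q.2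
    let f := nxt.getD lo n
    let l := prv.getD hi (-1)
    if (f : Int) ≤ l then pref.getD l.toNat 0 - pref.getD f 0 else 0)

-- ===== PRECONDITION & SPEC =====
-- Pre_ excludes only the inputs where A raises IndexError: endIndices shorter than startIndices
-- (A reads endIndices[i] for every i < len(startIndices)).
def Pre_numberOfItemsII (s : String) (startIndices : List Int) (endIndices : List Int) : Prop :=
  startIndices.length ≤ endIndices.length
instance (s : String) (startIndices : List Int) (endIndices : List Int) : Decidable (Pre_numberOfItemsII s startIndices endIndices) := by unfold Pre_numberOfItemsII; infer_instance

def pvWitness_numberOfItemsII : String × List Int × List Int := ("*|**|*", [1, 2], [6, 5])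

-- When two queries share the same start value and one of them sees no '|' in its window while the
-- other's window has a '*' strictly between two '|', A's skip set (keyed by start VALUE instead of
-- query index) wrongly zeroes the second query's answer; B returns its true star count, which is
-- the intended per-query value.
def D_numberOfItemsII (s : String) (startIndices : List Int) (endIndices : List Int) : Prop :=
  ∃ u ∈ startIndices.zip endIndices, ∃ v ∈ startIndices.zip endIndices, u.1 = v.1 ∧
    '|' ∉ PySem.List.slice s.toList (some (u.1 - 1)) (some u.2) ∧
    ['|', '*', '|'].isSublist (PySem.List.slice s.toList (some (v.1 - 1)) (some v.2)) = true
instance (s : String) (startIndices : List Int) (endIndices : List Int) : Decidable (D_numberOfItemsII s startIndices endIndices) := by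
  unfold D_numberOfItemsII; infer_instance

def Spec_numberOfItemsII (s : String) (startIndices : List Int) (endIndices : List Int) (out : List Int) : Prop := ¬ D_numberOfItemsII s startIndices endIndices → out = numberOfItemsII_alt s startIndices endIndices
instance (s : String) (startIndices : List Int) (endIndices : List Int) (out : List Int) : Decidable (Spec_numberOfItemsII s startIndices endIndices out) := by unfold Spec_numberOfItemsII; infer_instance

def pvDiffWitness_numberOfItemsII : String × List Int × List Int := ("|*|", [1, 1], [0, 3])
def pvDiffWitnessOut_numberOfItemsII : (List Int) × (List Int) := ([0, 0], [0, 1])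

-- ===== CLAIM (what is proved, stated in full; the proofs are below) =====
def Claim_unchanged_numberOfItemsII : Prop := ∀ (s : String) (startIndices : List Int) (endIndices : List Int), Dom_numberOfItemsII s startIndices endIndices → Pre_numberOfItemsII s startIndices endIndices → Spec_numberOfItemsII s startIndices endIndices (numberOfItemsII s startIndices endIndices)
def Claim_changed_numberOfItemsII : Prop := Dom_numberOfItemsII (pvDiffWitness_numberOfItemsII.1) (pvDiffWitness_numberOfItemsII.2.1) (pvDiffWitness_numberOfItemsII.2.2) ∧ Pre_numberOfItemsII (pvDiffWitness_numberOfItemsII.1) (pvDiffWitness_numberOfItemsII.2.1) (pvDiffWitness_numberOfItemsII.2.2) ∧ D_numberOfItemsII (pvDiffWitness_numberOfItemsII.1) (pvDiffWitness_numberOfItemsII.2.1) (pvDiffWitness_numberOfItemsII.2.2) ∧ numberOfItemsII (pvDiffWitness_numberOfItemsII.1) (pvDiffWitness_numberOfItemsII.2.1) (pvDiffWitness_numberOfItemsII.2.2) = pvDiffWitnessOut_numberOfItemsII.1 ∧ numberOfItemsII_alt (pvDiffWitness_numberOfItemsII.1) (pvDiffWitness_numberOfItemsII.2.1) (pvDiffWitness_numberOfItemsII.2.2)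 = pvDiffWitnessOut_numberOfItemsII.2 ∧ pvDiffWitnessOut_numberOfItemsII.1 ≠ pvDiffWitnessOut_numberOfItemsII.2
def Claim_exact_numberOfItemsII : Prop := ∀ (s : String) (startIndices : List Int) (endIndices : List Int), Dom_numberOfItemsII s startIndices endIndices → Pre_numberOfItemsII s startIndices endIndices → D_numberOfItemsII s startIndices endIndices → numberOfItemsII s startIndices endIndices ≠ numberOfItemsII_alt s startIndices endIndices

-- ===== LEMMAS AND PROOFS =====

-- ---- spec-level helper functions (proof layer only) ----

-- the window A slices for a query (start, end)
def pvWindow (cs : List Char) (a b : Int) : List Char :=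
  PySem.List.slice cs (some (a - 1)) (some b)

-- a '*' strictly between two '|' somewhere in t
def pvBarStarBar (t : List Char) : Prop :=
  ∃ p, p < t.length ∧ ∃ q, q < t.length ∧ ∃ r, r < t.length ∧ p < q ∧ q < r ∧
    t[p]? = some '|' ∧ t[q]? = some '*' ∧ t[r]? = some '|'

def pvSpecNxt (off : Nat) : List Char → Nat
  | [] => off
  | c :: t => if c = '|' then off else pvSpecNxt (off + 1) t

def pvScanPrv (acc : Int) (off : Nat) : List Char → Int
  | [] => acc
  | c :: t => pvScanPrv (if c = '|' then (off : Nat) else acc) (off + 1) t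

-- A's per-query count (meaningful when '|' ∈ window)
def pvCount (cs : List Char) (a b : Int) : Int :=
  let sub := pvWindow cs a b
  let fs := sub.idxOf '|'
  let ls := sub.length - 1 - sub.reverse.idxOf '|'
  (PySem.List.pyRange (fs : Int) (ls : Int) 1).foldl
    (fun c j => if PySem.List.pyGetD sub j ' ' == '*' then c + 1 else c) 0

-- B's per-query value
def pvBq (cs : List Char) (a b : Int) : Int :=
  let n := cs.length
  let lo := pvClamp n (a - 1)
  let hi := pvClamp n b
  let f := (pvNxt 0 cs).getD lo n
  let l := (pvPrv (-1) 0 cs).getD hi (-1)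
  if (f : Int) ≤ l then (pvPref 0 cs).getD l.toNat 0 - (pvPref 0 cs).getD f 0 else 0

-- A's skip condition for query k
def pvSkip (s : String) (st en : List Int) (k : Nat) : Prop :=
  ∃ j, j < st.length ∧ st.getD j 0 = st.getD k 0 ∧
    '|' ∉ pvWindow s.toList (st.getD j 0) (en.getD j 0)

-- ---- array lemmas ----

theorem pvPref_getD (cs : List Char) (a : Int) (i : Nat) (h : i ≤ cs.length) :
    (pvPref a cs).getD i 0 = a + ((cs.take i).countP (fun c => c == '*') : Int) := by
  induction cs generalizing a i with
  | nil =>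
    have : i = 0 := by simpa using h
    subst this
    simp [pvPref]
  | cons c cs ih =>
    cases i with
    | zero => simp [pvPref]
    | succ i =>
      simp only [pvPref, List.getD_cons_succ, List.take_succ_cons, List.countP_cons]
      rw [ih _ i (by simpa using h)]
      by_cases hc : c = '*' <;> simp [hc] <;> push_cast <;> ring

theorem pvNxt_headD (cs : List Char) (off : Nat) (d : Nat) :
    (pvNxt off cs).headD d = pvSpecNxt off cs := by
  induction cs generalizing off d with
  | nil => rfl
  | cons c cs ih =>
    simp only [pvNxt, List.headD_cons]
    rw [ih]
    rfl

theorem pvNxt_getD (cs : List Char) (off : Nat) (i : Nat) (d : Nat) (h : i ≤ cs.length) :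
    (pvNxt off cs).getD i d = pvSpecNxt (off + i) (cs.drop i) := by
  induction cs generalizing off i with
  | nil =>
    have : i = 0 := by simpa using h
    subst this
    rfl
  | cons c cs ih =>
    cases i with
    | zero =>
      simp only [pvNxt, List.getD_cons_zero, Nat.add_zero, List.drop_zero]
      rw [pvNxt_headD]
      rfl
    | succ i =>
      simp only [pvNxt, List.getD_cons_succ, List.drop_succ_cons]
      rw [ih (off + 1) i (by simpa using h)]
      congr 1
      omega

theorem pvSpecNxt_eq (cs : List Char) (off : Nat) :
    pvSpecNxt off cs = off + cs.findIdx (fun c => c == '|') := by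
  induction cs generalizing off with
  | nil => simp [pvSpecNxt]
  | cons c cs ih =>
    by_cases hc : c = '|'
    · simp [pvSpecNxt, hc, List.findIdx_cons]
    · have hbc : (c == '|') = false := by simp [hc]
      simp only [pvSpecNxt, hc, if_false, List.findIdx_cons, hbc, Bool.cond_false]
      rw [ih]
      omega

theorem pvPrv_getD (cs : List Char) (acc : Int) (off : Nat) (i : Nat) (d : Int) (h : i ≤ cs.length) :
    (pvPrv acc off cs).getD i d = pvScanPrv acc off (cs.take i) := by
  induction cs generalizing acc off i with
  | nil =>
    have : i = 0 := by simpa using h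
    subst this
    rfl
  | cons c cs ih =>
    cases i with
    | zero => rfl
    | succ i =>
      simp only [pvPrv, List.getD_cons_succ, List.take_succ_cons, pvScanPrv]
      exact ih _ _ i (by simpa using h)

theorem pvScanPrv_append (t : List Char) (acc : Int) (off : Nat) (c : Char) :
    pvScanPrv acc off (t ++ [c]) =
      if c = '|' then ((off + t.length : Nat) : Int) else pvScanPrv acc off t := by
  induction t generalizing acc off with
  | nil => by_cases hc : c = '|' <;> simp [pvScanPrv, hc]
  | cons d t ih =>
    simp only [List.cons_append, pvScanPrv]
    rw [ih]
    by_cases hc : c = '|'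
    · simp only [hc, if_pos rfl, List.length_cons]
      push_cast
      ring
    · simp [hc]

theorem pvScanPrv_spec (t : List Char) :
    (pvScanPrv (-1) 0 t = -1 ∧ ∀ k, (hk : k < t.length) → t[k] ≠ '|')
    ∨ (∃ k, ∃ (hk : k < t.length), pvScanPrv (-1) 0 t = (k : Int) ∧ t[k] = '|' ∧
        ∀ m, (hm : m < t.length) → k < m → t[m] ≠ '|') := by
  induction t using List.reverseRecOn with
  | nil =>
    left
    exact ⟨rfl, by intro k hk; simp at hk⟩
  | append_singleton t c ih =>
    rw [pvScanPrv_append]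
    by_cases hc : c = '|'
    · right
      refine ⟨t.length, by simp, by simp [hc], ?_, ?_⟩
      · rw [List.getElem_concat_length rfl]; exact hc
      · intro m hm hlt
        simp at hm
        omega
    · rw [if_neg hc]
      rcases ih with ⟨h1, h2⟩ | ⟨k, hk, h1, h2, h3⟩
      · left
        refine ⟨h1, ?_⟩
        intro m hm
        by_cases hm' : m < t.length
        · rw [List.getElem_append_left hm']
          exact h2 m hm'
        · have hme : m = t.length := by simp at hm; omega
          subst hme
          rw [List.getElem_concat_length rfl]
          exact hc
      · right
        refine ⟨k, by simp; omega, h1, by rw [List.getElem_append_left hk]; exact h2, ?_⟩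
        intro m hm hlt
        by_cases hm' : m < t.length
        · rw [List.getElem_append_left hm']
          exact h3 m hm' hlt
        · have hme : m = t.length := by simp at hm; omega
          subst hme
          rw [List.getElem_concat_length rfl]
          exact hc

theorem pvClamp_eq (n : Nat) (i : Int) : pvClamp n i = PySem.List.clampIdx n i := by
  simp only [pvClamp, PySem.List.clampIdx]
  split_ifs with h1 h2
  · omega
  · rfl
  · rfl

theorem pvClamp_le (n : Nat) (i : Int) : pvClamp n i ≤ n := by
  simp only [pvClamp]
  split_ifs with h1
  · omega
  · omega

theorem pvWindow_eq (cs : List Char) (a b : Int) :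
    pvWindow cs a b =
      (cs.drop (pvClamp cs.length (a - 1))).take (pvClamp cs.length b - pvClamp cs.length (a - 1)) := by
  rw [pvWindow, pvClamp_eq, pvClamp_eq]
  rfl

theorem pvIdxOf_eq (t : List Char) (c : Char) :
    t.idxOf c = t.findIdx (fun x => x == c) := rfl

-- ---- window facts ----

theorem pvSub_len (cs : List Char) (lo hi : Nat) :
    ((cs.drop lo).take (hi - lo)).length = min (hi - lo) (cs.length - lo) := by
  simp

theorem pvSub_get (cs : List Char) (lo hi j : Nat) (hj : j < ((cs.drop lo).take (hi - lo)).length) :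
    ((cs.drop lo).take (hi - lo))[j]? = cs[lo + j]? ∧ lo + j < hi ∧ lo + j < cs.length := by
  have hl := pvSub_len cs lo hi
  have h1 : j < hi - lo := by omega
  refine ⟨?_, by omega, by omega⟩
  rw [List.getElem?_take, if_pos h1, List.getElem?_drop]

-- one / two / three positions give a singleton / pair / triple subsequence
theorem pvSub_one (w : List Char) (c : Char) (r : Nat) (hr : w[r]? = some c) :
    List.Sublist [c] w := by
  rcases List.getElem?_eq_some_iff.mp hr with ⟨h1, h2⟩
  exact List.singleton_sublist.mpr (h2 ▸ List.getElem_mem h1)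

theorem pvSub_two : ∀ (w : List Char) (b c : Char) (q r : Nat), q < r →
    w[q]? = some b → w[r]? = some c → List.Sublist [b, c] w := by
  intro w
  induction w with
  | nil => intro b c q r _ gq _; simp at gq
  | cons x t ih =>
    intro b c q r hqr gq gr
    obtain ⟨r', rfl⟩ : ∃ r', r = r' + 1 := ⟨r - 1, by omega⟩
    cases q with
    | zero =>
      have hxb : x = b := by simpa using gq
      subst hxb
      exact List.Sublist.cons₂ x (pvSub_one t c r' (by simpa using gr))
    | succ q' =>
      exact List.Sublist.cons x (ih b c q' r' (by omega) (by simpa using gq) (by simpa using gr))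

theorem pvSub_three : ∀ (w : List Char) (a b c : Char) (p q r : Nat), p < q → q < r →
    w[p]? = some a → w[q]? = some b → w[r]? = some c → List.Sublist [a, b, c] w := by
  intro w
  induction w with
  | nil => intro a b c p q r _ _ gp _ _; simp at gp
  | cons x t ih =>
    intro a b c p q r hpq hqr gp gq gr
    obtain ⟨q', rfl⟩ : ∃ q', q = q' + 1 := ⟨q - 1, by omega⟩
    obtain ⟨r', rfl⟩ : ∃ r', r = r' + 1 := ⟨r - 1, by omega⟩
    cases p with
    | zero =>
      have hxa : x = a := by simpa using gp
      subst hxa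
      exact List.Sublist.cons₂ x (pvSub_two t b c q' r' (by omega) (by simpa using gq) (by simpa using gr))
    | succ p' =>
      exact List.Sublist.cons x
        (ih a b c p' q' r' (by omega) (by omega) (by simpa using gp) (by simpa using gq) (by simpa using gr))

-- the '|','*','|' subsequence test is exactly bar-star-bar
theorem pvBSB_iff (w : List Char) :
    (['|', '*', '|'].isSublist w = true) ↔ pvBarStarBar w := by
  rw [List.isSublist_iff_sublist]
  constructor
  · intro h
    obtain ⟨f, hf⟩ := List.sublist_iff_exists_orderEmbedding_getElem?_eq.mp h
    have h0 := hf 0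
    have h1 := hf 1
    have h2 := hf 2
    simp only [List.getElem?_cons_zero, List.getElem?_cons_succ] at h0 h1 h2
    have l0 := (List.getElem?_eq_some_iff.mp h0.symm).1
    have l1 := (List.getElem?_eq_some_iff.mp h1.symm).1
    have l2 := (List.getElem?_eq_some_iff.mp h2.symm).1
    exact ⟨f 0, l0, f 1, l1, f 2, l2,
      f.strictMono (by norm_num), f.strictMono (by norm_num), h0.symm, h1.symm, h2.symm⟩
  · rintro ⟨p, _, q, _, r, _, hpq, hqr, gp, gq, gr⟩
    exact pvSub_three w _ _ _ p q r hpq hqr gp gq gr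

theorem pvD_iff (s : String) (st en : List Int) :
    D_numberOfItemsII s st en ↔
      ∃ u ∈ st.zip en, ∃ v ∈ st.zip en, u.1 = v.1 ∧
        '|' ∉ pvWindow s.toList u.1 u.2 ∧
        pvBarStarBar (pvWindow s.toList v.1 v.2) := by
  unfold D_numberOfItemsII
  constructor
  · rintro ⟨u, hu, v, hv, heq, hnb, hpat⟩
    exact ⟨u, hu, v, hv, heq, hnb, (pvBSB_iff _).mp hpat⟩
  · rintro ⟨u, hu, v, hv, heq, hnb, hpat⟩
    exact ⟨u, hu, v, hv, heq, hnb, (pvBSB_iff _).mpr hpat⟩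

-- a (start, end) pair read off at index j is a member of the zip
theorem pvZip_mem (st en : List Int) (hpre : st.length ≤ en.length) (j : Nat) (hj : j < st.length) :
    (st.getD j 0, en.getD j 0) ∈ st.zip en := by
  have hj' : j < en.length := by omega
  have hz : j < (st.zip en).length := by simp; omega
  have hg : (st.zip en)[j]'hz = (st[j]'hj, en[j]'hj') := List.getElem_zip
  rw [List.getD_eq_getElem st 0 hj, List.getD_eq_getElem en 0 hj']
  exact hg ▸ List.getElem_mem hz

theorem pvFirstBar (t : List Char) (h : '|' ∈ t) :
    t.findIdx (fun x => x == '|') < t.length ∧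
    t[t.findIdx (fun x => x == '|')]? = some '|' ∧
    ∀ k, k < t.findIdx (fun x => x == '|') → t[k]? ≠ some '|' := by
  have hlt : t.findIdx (fun x => x == '|') < t.length :=
    List.findIdx_lt_length.mpr ⟨'|', h, by simp⟩
  refine ⟨hlt, ?_, ?_⟩
  · rw [List.getElem?_eq_getElem hlt]
    have := List.findIdx_getElem (w := hlt)
    simpa using this
  · intro k hk heq
    have hk' : k < t.length := lt_trans hk hlt
    have hne := List.not_of_lt_findIdx hk
    rw [List.getElem?_eq_getElem hk'] at heq
    simp only [Option.some.injEq] at heq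
    simp only [beq_eq_false_iff_ne, ne_eq] at hne
    exact hne heq

theorem pvLastBar (t : List Char) (h : '|' ∈ t) :
    t.length - 1 - t.reverse.findIdx (fun x => x == '|') < t.length ∧
    t[t.length - 1 - t.reverse.findIdx (fun x => x == '|')]? = some '|' ∧
    (∀ m, t.length - 1 - t.reverse.findIdx (fun x => x == '|') < m → t[m]? ≠ some '|') ∧
    t.findIdx (fun x => x == '|') ≤ t.length - 1 - t.reverse.findIdx (fun x => x == '|') := by
  have hrev : '|' ∈ t.reverse := by simpa using h
  have hrs : t.reverse.findIdx (fun x => x == '|') < t.reverse.length :=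
    List.findIdx_lt_length.mpr ⟨'|', hrev, by simp⟩
  have hlenrev : t.reverse.length = t.length := List.length_reverse
  have hrs' : t.reverse.findIdx (fun x => x == '|') < t.length := by omega
  have hpos : 0 < t.length := List.length_pos_of_mem h
  have hlsl : t.length - 1 - t.reverse.findIdx (fun x => x == '|') < t.length := by omega
  have hval : t[t.length - 1 - t.reverse.findIdx (fun x => x == '|')]'hlsl = '|' := by
    have hg := List.findIdx_getElem (w := hrs)
    rw [List.getElem_reverse] at hg
    simpa using hg
  refine ⟨hlsl, by rw [List.getElem?_eq_getElem hlsl, hval], ?_, ?_⟩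
  · intro m hm heq
    rcases List.getElem?_eq_some_iff.mp heq with ⟨hmlen, hmval⟩
    have hidx : t.length - 1 - m < t.reverse.findIdx (fun x => x == '|') := by omega
    have hne := List.not_of_lt_findIdx (xs := t.reverse) hidx
    rw [List.getElem_reverse] at hne
    have hne' : t[t.length - 1 - (t.length - 1 - m)]? ≠ some '|' := by
      rw [List.getElem?_eq_getElem (by omega)]
      intro hcon2
      exact absurd (Option.some.inj hcon2) (by simpa using hne)
    rw [show t.length - 1 - (t.length - 1 - m) = m by omega] at hne'
    exact hne' (by rw [List.getElem?_eq_getElem hmlen, hmval])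
  · by_contra hcon
    push_neg at hcon
    have hne := List.not_of_lt_findIdx hcon
    exact absurd hval (by simpa using hne)

theorem pvGlobFirst (cs : List Char) (lo hi : Nat)
    (hmem : '|' ∈ (cs.drop lo).take (hi - lo)) :
    pvSpecNxt lo (cs.drop lo) = lo + ((cs.drop lo).take (hi - lo)).findIdx (fun x => x == '|') := by
  rw [pvSpecNxt_eq]
  congr 1
  have hflt : ((cs.drop lo).take (hi - lo)).findIdx (fun x => x == '|') < ((cs.drop lo).take (hi - lo)).length :=
    List.findIdx_lt_length.mpr ⟨'|', hmem, by simp⟩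
  conv_lhs => rw [← List.take_append_drop (hi - lo) (cs.drop lo)]
  rw [List.findIdx_append, if_pos hflt]

theorem pvGlobLast (cs : List Char) (lo hi : Nat) (hhi : hi ≤ cs.length)
    (hmem : '|' ∈ (cs.drop lo).take (hi - lo)) :
    pvScanPrv (-1) 0 (cs.take hi)
      = ((lo + (((cs.drop lo).take (hi - lo)).length - 1 - ((cs.drop lo).take (hi - lo)).reverse.findIdx (fun x => x == '|')) : Nat) : Int) := by
  obtain ⟨hlsl, hlsv, hlsmax, hfl⟩ := pvLastBar _ hmem
  obtain ⟨hget, hlt_hi, hlt_n⟩ := pvSub_get cs lo hi _ hlsl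
  have htlen : (cs.take hi).length = hi := by simp; omega
  have hbar_t : (cs.take hi)[lo + (((cs.drop lo).take (hi - lo)).length - 1 - ((cs.drop lo).take (hi - lo)).reverse.findIdx (fun x => x == '|'))]? = some '|' := by
    rw [List.getElem?_take, if_pos hlt_hi, ← hget]
    exact hlsv
  rcases pvScanPrv_spec (cs.take hi) with ⟨h1, h2⟩ | ⟨k, hk, h1, h2, h3⟩
  · exfalso
    rcases List.getElem?_eq_some_iff.mp hbar_t with ⟨hb1, hb2⟩
    exact h2 _ hb1 hb2
  · rw [h1]
    congr 1
    set ls := ((cs.drop lo).take (hi - lo)).length - 1 - ((cs.drop lo).take (hi - lo)).reverse.findIdx (fun x => x == '|') with hlsdef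
    by_cases hklo : k < lo + ls
    · exfalso
      rcases List.getElem?_eq_some_iff.mp hbar_t with ⟨hb1, hb2⟩
      exact h3 (lo + ls) hb1 hklo hb2
    · by_cases hkhi : lo + ls < k
      · exfalso
        have hk' : k < hi := by rw [htlen] at hk; exact hk
        have hsublen : k - lo < ((cs.drop lo).take (hi - lo)).length := by
          have := pvSub_len cs lo hi
          omega
        obtain ⟨hg, _, _⟩ := pvSub_get cs lo hi (k - lo) hsublen
        have hcsk : cs[k]? = some '|' := by
          have ht : (cs.take hi)[k]? = some '|' := by
            rw [List.getElem?_eq_getElem hk, h2]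
          rwa [List.getElem?_take, if_pos hk'] at ht
        have hsubk : ((cs.drop lo).take (hi - lo))[k - lo]? = some '|' := by
          rw [hg, show lo + (k - lo) = k by omega]
          exact hcsk
        exact hlsmax (k - lo) (by omega) hsubk
      · omega

theorem pv_core_mem (cs : List Char) (lo hi : Nat) (hhi : hi ≤ cs.length) :
    ('|' ∈ (cs.drop lo).take (hi - lo)) ↔
      ((pvSpecNxt lo (cs.drop lo) : Int) ≤ pvScanPrv (-1) 0 (cs.take hi)) := by
  constructor
  · intro hmem
    rw [pvGlobFirst cs lo hi hmem, pvGlobLast cs lo hi hhi hmem]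
    obtain ⟨_, _, _, hfl⟩ := pvLastBar _ hmem
    push_cast
    omega
  · intro hle
    by_contra hnm
    have hf : lo ≤ pvSpecNxt lo (cs.drop lo) := by rw [pvSpecNxt_eq]; omega
    rcases pvScanPrv_spec (cs.take hi) with ⟨h1, _⟩ | ⟨k, hk, h1, h2, _⟩
    · rw [h1] at hle
      omega
    · have htlen : (cs.take hi).length = min hi cs.length := by simp
      have hk' : k < hi := by omega
      have hcsk : cs[k]? = some '|' := by
        have ht : (cs.take hi)[k]? = some '|' := by
          rw [List.getElem?_eq_getElem hk, h2]
        rwa [List.getElem?_take, if_pos hk'] at ht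
      by_cases hklo : lo ≤ k
      · apply hnm
        have hsublen : k - lo < ((cs.drop lo).take (hi - lo)).length := by
          have := pvSub_len cs lo hi
          have hkn : k < cs.length := by omega
          omega
        obtain ⟨hg, _, _⟩ := pvSub_get cs lo hi (k - lo) hsublen
        have : ((cs.drop lo).take (hi - lo))[k - lo]? = some '|' := by
          rw [hg, show lo + (k - lo) = k by omega]
          exact hcsk
        rcases List.getElem?_eq_some_iff.mp this with ⟨hb1, hb2⟩
        exact hb2 ▸ List.getElem_mem hb1
      · rw [h1] at hle
        omega

theorem pv_core_count (cs : List Char) (lo hi : Nat) (hhi : hi ≤ cs.length)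
    (hmem : '|' ∈ (cs.drop lo).take (hi - lo)) :
    (cs.take (lo + (((cs.drop lo).take (hi - lo)).length - 1 - ((cs.drop lo).take (hi - lo)).reverse.findIdx (fun x => x == '|')))).countP (fun c => c == '*')
      = (cs.take (lo + ((cs.drop lo).take (hi - lo)).findIdx (fun x => x == '|'))).countP (fun c => c == '*')
        + ((((cs.drop lo).take (hi - lo)).take (((cs.drop lo).take (hi - lo)).length - 1 - ((cs.drop lo).take (hi - lo)).reverse.findIdx (fun x => x == '|'))).drop (((cs.drop lo).take (hi - lo)).findIdx (fun x => x == '|'))).countP (fun c => c == '*') := by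
  set sub := (cs.drop lo).take (hi - lo) with hsubdef
  obtain ⟨hlsl, _, _, hfl⟩ := pvLastBar sub hmem
  set fs := sub.findIdx (fun x => x == '|') with hfsdef
  set ls := sub.length - 1 - sub.reverse.findIdx (fun x => x == '|') with hlsdef
  have hsl := pvSub_len cs lo hi
  rw [← hsubdef] at hsl
  have hseg : (sub.take ls).drop fs = (cs.drop (lo + fs)).take (ls - fs) := by
    rw [List.drop_take]
    have hdf : sub.drop fs = (cs.drop (lo + fs)).take (hi - lo - fs) := by
      rw [hsubdef, List.drop_take, List.drop_drop]
    rw [hdf, List.take_take]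
    congr 1
    omega
  rw [hseg]
  rw [show lo + ls = (lo + fs) + (ls - fs) by omega]
  rw [List.take_add, List.countP_append]

-- ---- A's inner loop ----

theorem pvCount_eq (cs : List Char) (a b : Int) (hmem : '|' ∈ pvWindow cs a b) :
    pvCount cs a b =
      ((((pvWindow cs a b).take ((pvWindow cs a b).length - 1 - (pvWindow cs a b).reverse.idxOf '|')).drop ((pvWindow cs a b).idxOf '|')).countP (fun c => c == '*') : Int) := by
  simp only [pvCount, pvIdxOf_eq]
  set sub := pvWindow cs a b with hsubdef
  set fs := sub.findIdx (fun x => x == '|') with hfsdef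
  set ls := sub.length - 1 - sub.reverse.findIdx (fun x => x == '|') with hlsdef
  obtain ⟨hlsl, _, _, hfl⟩ := pvLastBar sub hmem
  rw [← hlsdef] at hlsl hfl
  have h1 : ∀ (acc : Int), ∀ j ∈ PySem.List.pyRange (fs : Int) (ls : Int) 1,
      (if PySem.List.pyGetD sub j ' ' == '*' then acc + 1 else acc)
      = (if PySem.List.pyGetD (sub.take ls) j ' ' == '*' then acc + 1 else acc) := by
    intro acc j hj
    rw [PySem.List.mem_pyRange_one] at hj
    have h0 : 0 ≤ j := le_trans (Int.natCast_nonneg fs) hj.1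
    obtain ⟨m, rfl⟩ : ∃ m : Nat, (m : Int) = j := ⟨j.toNat, by omega⟩
    rw [PySem.List.pyGetD_natCast, PySem.List.pyGetD_natCast]
    have hm : m < ls := by exact_mod_cast hj.2
    have : (sub.take ls).getD m ' ' = sub.getD m ' ' := by
      rw [List.getD_eq_getElem?_getD, List.getD_eq_getElem?_getD, List.getElem?_take, if_pos hm]
    rw [this]
  rw [PySem.List.foldl_congr_mem _ _ _ _ h1]
  have h2 : (ls : Int) = PySem.List.len (sub.take ls) := by
    simp [PySem.List.len]
    omega
  rw [h2]
  rw [PySem.List.foldl_pyRange_pyGetD (sub.take ls) ' ' (fun c x => if x == '*' then c + 1 else c) 0 (Int.natCast_nonneg fs)]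
  rw [Int.toNat_natCast]
  rw [PySem.List.foldl_count_if (fun x => x == '*')]
  simp

-- ---- B's per-query value ----

theorem pvBq_fl (cs : List Char) (a b : Int) :
    pvBq cs a b =
      (if (pvSpecNxt (pvClamp cs.length (a - 1)) (cs.drop (pvClamp cs.length (a - 1))) : Int)
          ≤ pvScanPrv (-1) 0 (cs.take (pvClamp cs.length b))
       then (pvPref 0 cs).getD (pvScanPrv (-1) 0 (cs.take (pvClamp cs.length b))).toNat 0
            - (pvPref 0 cs).getD (pvSpecNxt (pvClamp cs.length (a - 1)) (cs.drop (pvClamp cs.length (a - 1)))) 0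
       else 0) := by
  simp only [pvBq]
  rw [pvNxt_getD cs 0 _ cs.length (pvClamp_le _ _), pvPrv_getD cs (-1) 0 _ (-1) (pvClamp_le _ _)]
  rw [Nat.zero_add]

theorem pvBq_eq (cs : List Char) (a b : Int) (hmem : '|' ∈ pvWindow cs a b) :
    pvBq cs a b = pvCount cs a b := by
  have hw := pvWindow_eq cs a b
  have hlo := pvClamp_le cs.length (a - 1)
  have hhi := pvClamp_le cs.length b
  set lo := pvClamp cs.length (a - 1) with hlodef
  set hi := pvClamp cs.length b with hhidef
  have hmem' : '|' ∈ (cs.drop lo).take (hi - lo) := by rw [← hw]; exact hmem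
  rw [pvBq_fl, if_pos ((pv_core_mem cs lo hi hhi).mp hmem')]
  rw [pvGlobFirst cs lo hi hmem', pvGlobLast cs lo hi hhi hmem']
  rw [Int.toNat_natCast]
  rw [pvCount_eq cs a b hmem]
  simp only [pvIdxOf_eq, hw]
  set sub := (cs.drop lo).take (hi - lo) with hsubdef
  set fs := sub.findIdx (fun x => x == '|') with hfsdef
  set ls := sub.length - 1 - sub.reverse.findIdx (fun x => x == '|') with hlsdef
  obtain ⟨hlsl, _, _, hfl⟩ := pvLastBar sub hmem'
  rw [← hlsdef] at hlsl hfl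
  rw [← hfsdef] at hfl
  have hsl := pvSub_len cs lo hi
  rw [← hsubdef] at hsl
  have h1 : lo + ls ≤ cs.length := by omega
  have h2 : lo + fs ≤ cs.length := by omega
  rw [pvPref_getD cs 0 _ h1, pvPref_getD cs 0 _ h2]
  have hc := pv_core_count cs lo hi hhi hmem'
  rw [← hsubdef, ← hfsdef, ← hlsdef] at hc
  rw [hc]
  push_cast
  ring

theorem pvBq_zero_of_not_mem (cs : List Char) (a b : Int) (hmem : '|' ∉ pvWindow cs a b) :
    pvBq cs a b = 0 := by
  rw [pvBq_fl, if_neg]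
  intro hle
  exact hmem (by
    rw [pvWindow_eq]
    exact (pv_core_mem cs _ _ (pvClamp_le _ _)).mpr hle)

theorem pvBq_zero_of_not_pattern (cs : List Char) (a b : Int)
    (h : ¬ pvBarStarBar (pvWindow cs a b)) : pvBq cs a b = 0 := by
  by_cases hm : '|' ∈ pvWindow cs a b
  · rw [pvBq_eq cs a b hm, pvCount_eq cs a b hm]
    simp only [pvIdxOf_eq]
    set sub := pvWindow cs a b with hsubdef
    set fs := sub.findIdx (fun x => x == '|') with hfsdef
    set ls := sub.length - 1 - sub.reverse.findIdx (fun x => x == '|') with hlsdef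
    obtain ⟨hfsl, hfsv, _⟩ := pvFirstBar sub hm
    obtain ⟨hlsl, hlsv, _, hfl⟩ := pvLastBar sub hm
    have hz : ((sub.take ls).drop fs).countP (fun c => c == '*') = 0 := by
      rw [List.countP_eq_zero]
      intro x hx hps
      have hxs : x = '*' := by simpa using hps
      subst hxs
      rcases List.mem_iff_getElem.mp hx with ⟨m, hm2, hval⟩
      have hseglen : ((sub.take ls).drop fs).length = ls - fs := by simp; omega
      have hfm : fs + m < ls := by omega
      have hq : sub[fs + m]? = some '*' := by
        have hval' : ((sub.take ls).drop fs)[m]? = some '*' := by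
          rw [List.getElem?_eq_getElem hm2, hval]
        rwa [List.getElem?_drop, List.getElem?_take, if_pos hfm] at hval'
      have hm0 : 0 < m := by
        rcases Nat.eq_zero_or_pos m with h0 | h0
        · exfalso
          subst h0
          rw [Nat.add_zero] at hq
          rw [hq] at hfsv
          simp at hfsv
        · exact h0
      exact h ⟨fs, by omega, fs + m, by omega, ls, by omega, by omega, hfm, hfsv, hq, hlsv⟩
    rw [hz]
    simp
  · exact pvBq_zero_of_not_mem cs a b hm

theorem pvBq_pos_of_pattern (cs : List Char) (a b : Int)
    (hpat : pvBarStarBar (pvWindow cs a b)) : 0 < pvBq cs a b := by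
  obtain ⟨p, hp, q, hq, r, hr, hpq, hqr, hpv, hqv, hrv⟩ := hpat
  have hm : '|' ∈ pvWindow cs a b := by
    rcases List.getElem?_eq_some_iff.mp hpv with ⟨h1, h2⟩
    exact h2 ▸ List.getElem_mem h1
  rw [pvBq_eq cs a b hm, pvCount_eq cs a b hm]
  simp only [pvIdxOf_eq]
  set sub := pvWindow cs a b with hsubdef
  set fs := sub.findIdx (fun x => x == '|') with hfsdef
  set ls := sub.length - 1 - sub.reverse.findIdx (fun x => x == '|') with hlsdef
  obtain ⟨hfsl, hfsv, hfsmin⟩ := pvFirstBar sub hm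
  obtain ⟨hlsl, hlsv, hlsmax, hfl⟩ := pvLastBar sub hm
  have hfsp : fs ≤ p := by
    by_contra hcon
    exact hfsmin p (by omega) hpv
  have hrls : r ≤ ls := by
    by_contra hcon
    exact hlsmax r (by omega) hrv
  have hq1 : fs < q := by omega
  have hq2 : q < ls := by omega
  have hseg : ((sub.take ls).drop fs)[q - fs]? = some '*' := by
    rw [List.getElem?_drop, List.getElem?_take, show fs + (q - fs) = q by omega, if_pos hq2]
    exact hqv
  have hmemseg : '*' ∈ (sub.take ls).drop fs := by
    rcases List.getElem?_eq_some_iff.mp hseg with ⟨h1, h2⟩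
    exact h2 ▸ List.getElem_mem h1
  have hcp : 0 < ((sub.take ls).drop fs).countP (fun c => c == '*') := by
    rcases Nat.eq_zero_or_pos (((sub.take ls).drop fs).countP (fun c => c == '*')) with h0 | h0
    · exfalso
      rw [List.countP_eq_zero] at h0
      exact h0 '*' hmemseg (by simp)
    · exact h0
  exact_mod_cast hcp

-- ---- A-side structure lemmas ----

theorem pvFoldl_length {α : Type} (l : List α) (step : List Int → α → List Int)
    (h : ∀ o i, (step o i).length = o.length) :
    ∀ out : List Int, (l.foldl step out).length = out.length := by
  induction l with
  | nil => intro out; rfl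
  | cons x l ih => intro out; rw [List.foldl_cons, ih, h]

theorem pvFoldSet (C : Int → Bool) (v : Int → Int) :
    ∀ (d : Nat) (a : Nat) (out : List Int) (n : Nat), out.length = n → n - a = d →
    ∀ k, k < n →
      ((PySem.List.pyRange (a : Int) (n : Int) 1).foldl
        (fun o i => if C i then o else PySem.List.pySetD o i (v i)) out)[k]?
      = if a ≤ k ∧ ¬ C (k : Int) then some (v (k : Int)) else out[k]? := by
  intro d
  induction d with
  | zero =>
    intro a out n hlen hd k hk
    rw [show PySem.List.pyRange (a : Int) (n : Int) 1 = [] from by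
      simp [PySem.List.pyRange]
      omega]
    rw [List.foldl_nil, if_neg]
    rintro ⟨h1, _⟩
    omega
  | succ d ih =>
    intro a out n hlen hd k hk
    have ha : (a : Int) < (n : Int) := by omega
    rw [PySem.List.pyRange_one_cons ha, List.foldl_cons,
        show ((a : Int) + 1) = ((a + 1 : Nat) : Int) by push_cast; ring]
    by_cases hC : C (a : Int)
    · rw [if_pos hC]
      rw [ih (a + 1) out n hlen (by omega) k hk]
      by_cases hCk : C (k : Int)
      · simp [hCk]
      · by_cases hak : a ≤ k
        · rcases Nat.lt_or_ge a k with h' | h'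
          · rw [if_pos (And.intro (by omega) (by simp [hCk])), if_pos (And.intro hak (by simp [hCk]))]
          · have hka : k = a := by omega
            subst hka
            exact absurd hC hCk
        · rw [if_neg (by rintro ⟨h1, _⟩; omega), if_neg (by rintro ⟨h1, _⟩; omega)]
    · rw [if_neg hC]
      have hlen' : (PySem.List.pySetD out (a : Int) (v (a : Int))).length = n := by
        rw [PySem.List.length_pySetD]; exact hlen
      rw [ih (a + 1) (PySem.List.pySetD out (a : Int) (v (a : Int))) n hlen' (by omega) k hk]
      have hset : ∀ m : Nat, (PySem.List.pySetD out (a : Int) (v (a : Int)))[m]? =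
          if a = m then (if a < out.length then some (v (a : Int)) else none) else out[m]? := by
        intro m
        rw [PySem.List.pySetD_natCast, List.getElem?_set]
      by_cases hak : k = a
      · subst hak
        rw [if_neg (by rintro ⟨h1, _⟩; omega)]
        rw [hset k, if_pos rfl, if_pos (by omega)]
        rw [if_pos (And.intro (le_refl _) (by simp [hC]))]
      · have houtk : (PySem.List.pySetD out (a : Int) (v (a : Int)))[k]? = out[k]? := by
          rw [hset k, if_neg (by intro h; exact hak h.symm)]
        rw [houtk]
        by_cases hCk : C (k : Int)
        · simp [hCk]
        · by_cases hak2 : a ≤ k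
          · rw [if_pos (And.intro (by omega) (by simp [hCk])), if_pos (And.intro hak2 (by simp [hCk]))]
          · rw [if_neg (by rintro ⟨h1, _⟩; omega), if_neg (by rintro ⟨h1, _⟩; omega)]

theorem pvFoldSkip (P : Int → Prop) [DecidablePred P] (key : Int → Int) :
    ∀ (d : Nat) (a n : Nat) (sk : PySem.Set Int), n - a = d → ∀ x : Int,
      (x ∈ (PySem.List.pyRange (a : Int) (n : Int) 1).foldl
        (fun s i => if P i then PySem.Set.add s (key i) else s) sk)
      ↔ x ∈ sk ∨ ∃ i : Nat, a ≤ i ∧ i < n ∧ P (i : Int) ∧ key (i : Int) = x := by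
  intro d
  induction d with
  | zero =>
    intro a n sk hd x
    rw [show PySem.List.pyRange (a : Int) (n : Int) 1 = [] from by
      simp [PySem.List.pyRange]
      omega]
    rw [List.foldl_nil]
    constructor
    · exact Or.inl
    · rintro (h | ⟨i, h1, h2, _, _⟩)
      · exact h
      · omega
  | succ d ih =>
    intro a n sk hd x
    have ha : (a : Int) < (n : Int) := by omega
    rw [PySem.List.pyRange_one_cons ha, List.foldl_cons,
        show ((a : Int) + 1) = ((a + 1 : Nat) : Int) by push_cast; ring]
    rw [ih (a + 1) n _ (by omega) x]
    by_cases hP : P (a : Int)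
    · rw [if_pos hP, PySem.Set.mem_add]
      constructor
      · rintro ((h | h) | ⟨i, h1, h2, h3, h4⟩)
        · exact Or.inl h
        · exact Or.inr ⟨a, le_refl _, by omega, hP, h.symm⟩
        · exact Or.inr ⟨i, by omega, h2, h3, h4⟩
      · rintro (h | ⟨i, h1, h2, h3, h4⟩)
        · exact Or.inl (Or.inl h)
        · by_cases hia : i = a
          · subst hia; exact Or.inl (Or.inr h4.symm)
          · exact Or.inr ⟨i, by omega, h2, h3, h4⟩
    · rw [if_neg hP]
      constructor
      · rintro (h | ⟨i, h1, h2, h3, h4⟩)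
        · exact Or.inl h
        · exact Or.inr ⟨i, by omega, h2, h3, h4⟩
      · rintro (h | ⟨i, h1, h2, h3, h4⟩)
        · exact Or.inl h
        · by_cases hia : i = a
          · subst hia; exact absurd h3 hP
          · exact Or.inr ⟨i, by omega, h2, h3, h4⟩

theorem pvContains_iff (s' : PySem.Set Int) (y : Int) :
    (PySem.Set.contains s' y = true) ↔ y ∈ s' := by
  simp [PySem.Set.contains]

theorem pvSkip_iff (s : String) (st en : List Int) (x : Int) :
    (PySem.Set.contains
      ((PySem.List.pyRange (0 : Int) (st.length : Int) 1).foldl (fun sk i =>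
        if '|' ∉ PySem.List.slice s.toList (some (PySem.List.pyGetD st i 0 - 1)) (some (PySem.List.pyGetD en i 0))
        then PySem.Set.add sk (PySem.List.pyGetD st i 0) else sk) PySem.Set.empty) x) = true
    ↔ ∃ j, j < st.length ∧ st.getD j 0 = x ∧ '|' ∉ pvWindow s.toList (st.getD j 0) (en.getD j 0) := by
  rw [pvContains_iff]
  have hfs := pvFoldSkip
    (fun i => '|' ∉ PySem.List.slice s.toList (some (PySem.List.pyGetD st i 0 - 1)) (some (PySem.List.pyGetD en i 0)))
    (fun i => PySem.List.pyGetD st i 0) (st.length - 0) 0 st.length PySem.Set.empty rfl x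
  simp only [Nat.cast_zero] at hfs
  rw [hfs]
  constructor
  · rintro (h | ⟨i, _, h2, h3, h4⟩)
    · simp [PySem.Set.empty] at h
    · refine ⟨i, h2, ?_, ?_⟩
      · simpa using h4
      · simpa [pvWindow] using h3
  · rintro ⟨j, h1, h2, h3⟩
    right
    refine ⟨j, Nat.zero_le _, h1, ?_, by simpa using h2⟩
    simpa [pvWindow] using h3

theorem pvA_length (s : String) (st en : List Int) :
    (numberOfItemsII s st en).length = st.length := by
  simp only [numberOfItemsII]
  refine (pvFoldl_length _ _ ?_ _).trans (by simp)
  intro o i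
  dsimp only
  split_ifs
  · rfl
  · exact PySem.List.length_pySetD _ _ _

theorem pvA_elem_skip (s : String) (st en : List Int)
    (k : Nat) (hk : k < st.length) (hskip : pvSkip s st en k) :
    (numberOfItemsII s st en)[k]? = some 0 := by
  simp only [numberOfItemsII]
  refine Eq.trans
    (pvFoldSet
      (fun i => PySem.Set.contains
        ((PySem.List.pyRange (0 : Int) (st.length : Int) 1).foldl (fun sk i =>
          if '|' ∉ PySem.List.slice s.toList (some (PySem.List.pyGetD st i 0 - 1)) (some (PySem.List.pyGetD en i 0))
          then PySem.Set.add sk (PySem.List.pyGetD st i 0) else sk) PySem.Set.empty)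
        (PySem.List.pyGetD st i 0))
      (fun i =>
        let substring := PySem.List.slice s.toList (some (PySem.List.pyGetD st i 0 - 1)) (some (PySem.List.pyGetD en i 0))
        let initialStartPoint := substring.idxOf '|'
        let endPoint := substring.length - 1 - substring.reverse.idxOf '|'
        (PySem.List.pyRange (initialStartPoint : Int) (endPoint : Int) 1).foldl
          (fun c j => if PySem.List.pyGetD substring j ' ' == '*' then c + 1 else c) 0)
      st.length 0 (List.replicate st.length 0) st.length (by simp) rfl k hk) ?_
  rw [if_neg]
  · rw [List.getElem?_replicate, if_pos hk]
  · rintro ⟨_, hnc⟩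
    apply hnc
    rw [pvSkip_iff s st en]
    simpa [PySem.List.pyGetD_natCast] using hskip

theorem pvA_elem_noskip (s : String) (st en : List Int)
    (k : Nat) (hk : k < st.length) (hskip : ¬ pvSkip s st en k) :
    (numberOfItemsII s st en)[k]? = some (pvCount s.toList (st.getD k 0) (en.getD k 0)) := by
  simp only [numberOfItemsII]
  refine Eq.trans
    (pvFoldSet
      (fun i => PySem.Set.contains
        ((PySem.List.pyRange (0 : Int) (st.length : Int) 1).foldl (fun sk i =>
          if '|' ∉ PySem.List.slice s.toList (some (PySem.List.pyGetD st i 0 - 1)) (some (PySem.List.pyGetD en i 0))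
          then PySem.Set.add sk (PySem.List.pyGetD st i 0) else sk) PySem.Set.empty)
        (PySem.List.pyGetD st i 0))
      (fun i =>
        let substring := PySem.List.slice s.toList (some (PySem.List.pyGetD st i 0 - 1)) (some (PySem.List.pyGetD en i 0))
        let initialStartPoint := substring.idxOf '|'
        let endPoint := substring.length - 1 - substring.reverse.idxOf '|'
        (PySem.List.pyRange (initialStartPoint : Int) (endPoint : Int) 1).foldl
          (fun c j => if PySem.List.pyGetD substring j ' ' == '*' then c + 1 else c) 0)
      st.length 0 (List.replicate st.length 0) st.length (by simp) rfl k hk) ?_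
  rw [if_pos]
  · simp only [PySem.List.pyGetD_natCast]
    rfl
  · refine ⟨Nat.zero_le _, ?_⟩
    intro hC
    apply hskip
    rw [pvSkip_iff s st en] at hC
    simpa [PySem.List.pyGetD_natCast] using hC

theorem pvB_elem (s : String) (st en : List Int) (hpre : st.length ≤ en.length)
    (k : Nat) (hk : k < st.length) :
    (numberOfItemsII_alt s st en)[k]? = some (pvBq s.toList (st.getD k 0) (en.getD k 0)) := by
  simp only [numberOfItemsII_alt]
  have hzl : (st.zip en).length = st.length := by simp; omega
  rw [List.getElem?_map, List.getElem?_eq_getElem (by rw [hzl]; exact hk)]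
  rw [List.getElem_zip]
  have h1 : st.getD k 0 = st[k] := List.getD_eq_getElem st 0 hk
  have h2 : en.getD k 0 = en[k]'(by omega) := List.getD_eq_getElem en 0 (by omega)
  rw [h1, h2]
  rfl

theorem pvB_length (s : String) (st en : List Int) (hpre : st.length ≤ en.length) :
    (numberOfItemsII_alt s st en).length = st.length := by
  simp [numberOfItemsII_alt]
  omega

-- ===== VERDICT (by name: the statement is the Claim_ definition above) =====
theorem numberOfItemsII_spec : Claim_unchanged_numberOfItemsII := by
  unfold Claim_unchanged_numberOfItemsII
  intro s st en hdom hpre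
  unfold Spec_numberOfItemsII
  intro hnd
  apply List.ext_getElem?
  intro k
  by_cases hk : k < st.length
  · rw [pvB_elem s st en hpre k hk]
    by_cases hs : pvSkip s st en k
    · rw [pvA_elem_skip s st en k hk hs]
      obtain ⟨j, hj, hjk, hbar⟩ := hs
      have hnp : ¬ pvBarStarBar (pvWindow s.toList (st.getD k 0) (en.getD k 0)) := by
        intro hp
        exact hnd ((pvD_iff s st en).mpr
          ⟨(st.getD j 0, en.getD j 0), pvZip_mem st en hpre j hj,
           (st.getD k 0, en.getD k 0), pvZip_mem st en hpre k hk, hjk, hbar, hp⟩)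
      rw [pvBq_zero_of_not_pattern _ _ _ hnp]
    · have hmem : '|' ∈ pvWindow s.toList (st.getD k 0) (en.getD k 0) := by
        by_contra hnm
        exact hs ⟨k, hk, rfl, hnm⟩
      rw [pvA_elem_noskip s st en k hk hs, pvBq_eq _ _ _ hmem]
  · rw [List.getElem?_eq_none (by rw [pvA_length]; omega),
        List.getElem?_eq_none (by rw [pvB_length s st en hpre]; omega)]

theorem numberOfItemsII_changed : Claim_changed_numberOfItemsII := by
  unfold Claim_changed_numberOfItemsII
  decide

theorem numberOfItemsII_tight : Claim_exact_numberOfItemsII := by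
  unfold Claim_exact_numberOfItemsII
  intro s st en hdom hpre hd heq
  obtain ⟨u, hu, v, hv, huv, hbar, hpat⟩ := (pvD_iff s st en).mp hd
  obtain ⟨i, hiz, hiu⟩ := List.mem_iff_getElem.mp hu
  obtain ⟨j, hjz, hjv⟩ := List.mem_iff_getElem.mp hv
  have hzl : (st.zip en).length = min st.length en.length := List.length_zip
  have hi : i < st.length := by omega
  have hj : j < st.length := by omega
  have hui : u = (st.getD i 0, en.getD i 0) := by
    rw [← hiu, List.getElem_zip, List.getD_eq_getElem st 0 hi, List.getD_eq_getElem en 0 (by omega)]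
  have hvj : v = (st.getD j 0, en.getD j 0) := by
    rw [← hjv, List.getElem_zip, List.getD_eq_getElem st 0 hj, List.getD_eq_getElem en 0 (by omega)]
  rw [hui] at hbar
  rw [hvj] at hpat
  rw [hui, hvj] at huv
  have hskip : pvSkip s st en j := ⟨i, hi, huv, hbar⟩
  have hA := pvA_elem_skip s st en j hj hskip
  have hB := pvB_elem s st en hpre j hj
  rw [heq, hB] at hA
  have hpos := pvBq_pos_of_pattern s.toList (st.getD j 0) (en.getD j 0) hpat
  have h0 := Option.some.inj hA
  omega
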